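-- pv_equiv track=rewrite | github.com/Addono/Intro-to-crypto | hw1/ex_3.py | increment_key
-- ===== SOURCE A (Python) =====
-- def increment_key(key: list, l: int = 0, max_value: int = 256) -> list:
--     """Increments a key, starting at the largest index. Returns None if no further increments can be made."""
--     # Let i point to the last index plus one of the key.
--     i = len(key)
--     while i > l:  # Only increment indexes which are not within the first l fixed ones.
--         # Decrease the index, and increment the key at this index
--         i -= 1
--         key[i] += 1
--
--         # Check if the key now exceeds the maximum.
--         if key[i] >= max_value:
--             # Set the corresponding index to zero and increment the next index
--             key[i] = 0
--         else:
--             # We are finished incrementing the key.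
--             return key
-- ===== SOURCE B (Python) =====
-- def increment_key(key: list, l: int = 0, max_value: int = 256) -> list:
--     """Increments a key, starting at the largest index. Returns None if no further increments can be made."""
--     lo = max(l, 0)
--     # Find the rightmost incrementable position without mutating anything.
--     pos = None
--     for i in range(len(key) - 1, lo - 1, -1):
--         if key[i] + 1 < max_value:
--             pos = i
--             break
--     if pos is None:
--         # Exhausted: zero the whole mutable tail and return None.
--         for j in range(lo, len(key)):
--             key[j] = 0
--         return None
--     key[pos] += 1
--     for j in range(pos + 1, len(key)):
--         key[j] = 0
--     return key
-- ===== Notes on version B (the rewrite author's own statement) =====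
-- stated objective: alternative
-- what changed: B replaces A's single mutate-as-you-go carry loop by a pure right-to-left scan that first locates the rightmost incrementable position (clamping l to 0), then performs the increment and tail-zeroing in separate loops.
-- intended difference: When l < 0 and every digit would overflow (key nonempty, max_value >= 2), A wraps around via Python negative indexing and returns the zeroed key with its last digit set to 1, while B returns None; None is intended because the key space below the fixed prefix is exhausted. — e.g. on increment_key([1], -1, 2): A returns some [1], B returns none
import Mathlib
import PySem

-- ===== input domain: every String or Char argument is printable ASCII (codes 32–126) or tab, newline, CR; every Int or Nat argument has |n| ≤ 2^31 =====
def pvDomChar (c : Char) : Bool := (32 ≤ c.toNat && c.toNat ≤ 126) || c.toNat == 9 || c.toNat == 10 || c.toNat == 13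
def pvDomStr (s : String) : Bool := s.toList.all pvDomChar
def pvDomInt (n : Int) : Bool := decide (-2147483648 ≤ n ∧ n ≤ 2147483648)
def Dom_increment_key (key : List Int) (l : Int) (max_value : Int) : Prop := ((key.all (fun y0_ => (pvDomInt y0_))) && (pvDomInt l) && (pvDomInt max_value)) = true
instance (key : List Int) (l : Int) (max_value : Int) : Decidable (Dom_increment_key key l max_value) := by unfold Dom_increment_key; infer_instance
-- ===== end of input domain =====

-- B replaces A's single mutate-as-you-go carry loop by a scan that first finds the rightmost
-- incrementable position, then increments and zeroes the tail in separate loops (objective: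
-- alternative).  Both Pythons mutate `key` in place; the equivalence proved here is about the
-- RETURN value only.

-- ===== PORT A =====
-- while i > l: i -= 1; key[i] += 1; if key[i] >= max_value: key[i] = 0 else: return key
-- (fuel only makes the recursion structural: the while loop runs at most (i - l) iterations,
--  one per decrement of i, and with fuel exhausted i ≤ l, where the loop would stop anyway)
def increment_key_loop : Nat → List Int → Int → Int → Int → Option (List Int)
  | 0, _, _, _, _ => none
  | f + 1, key, i, l, max_value =>
    if l < i then
      match PySem.List.pyGet? key (i - 1) with
      | none => none   -- IndexError (excluded by Pre_)
      | some v =>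
        if max_value ≤ v + 1 then
          increment_key_loop f (PySem.List.pySetD key (i - 1) 0) (i - 1) l max_value
        else
          some (PySem.List.pySetD key (i - 1) (v + 1))
    else none          -- fell off the loop: implicit `return None`

def increment_key (key : List Int) (l : Int) (max_value : Int) : Option (List Int) :=
  increment_key_loop ((key.length : Int) - l).toNat key (key.length : Int) l max_value

-- ===== PORT B =====
-- for i in range(len(key)-1, lo-1, -1): if key[i] + 1 < max_value: pos = i; break
-- (the countdown argument is the index plus one, so the scan visits i-1, i-2, …, lo)
def incB_find (key : List Int) (max_value : Int) (lo : Nat) : Nat → Option Nat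
  | 0 => none
  | i + 1 =>
    if i + 1 ≤ lo then none
    else if key[i]! + 1 < max_value then some i
    else incB_find key max_value lo i

-- for j in range(a, len(key)): key[j] = 0   (exact for a Nat lower bound a)
def incB_zeroFrom (key : List Int) (a : Nat) : List Int :=
  (List.range' a (key.length - a)).foldl (fun k t => k.set t 0) key

def increment_key_alt (key : List Int) (l : Int) (max_value : Int) : Option (List Int) :=
  let lo := (max l 0).toNat
  match incB_find key max_value lo key.length with
  | none => none   -- (Source B also zeroes key[lo:] in place; the return value is None)
  | some p => some (incB_zeroFrom (key.set p (key[p]! + 1)) (p + 1))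

-- ===== PRECONDITION & SPEC =====
-- Pre_ excludes exactly the inputs where A raises IndexError by running off the left end with
-- Python negative indexing: an empty key with l < 0, and a full-carry key whose wrap-around
-- re-carry (max_value ≤ 1) walks below index -len(key) because l < -len(key).
def Pre_increment_key (key : List Int) (l : Int) (max_value : Int) : Prop :=
  ¬(key = [] ∧ l < 0) ∧
  ¬(key ≠ [] ∧ l + (key.length : Int) < 0 ∧ max_value ≤ 1 ∧ ∀ x ∈ key, max_value ≤ x + 1)
instance (key : List Int) (l : Int) (max_value : Int) : Decidable (Pre_increment_key key l max_value) := by unfold Pre_increment_key; infer_instance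
def pvWitness_increment_key : List Int × Int × Int := ([3, 255], 0, 256)

-- When l < 0 and every digit of the nonempty key would overflow (and max_value ≥ 2), A wraps
-- around via Python negative indexing and returns the zeroed key with its last digit set to 1,
-- while B returns none; none is the intended value because the key space is exhausted.
def D_increment_key (key : List Int) (l : Int) (max_value : Int) : Prop :=
  l < 0 ∧ key ≠ [] ∧ 2 ≤ max_value ∧ ∀ x ∈ key, max_value ≤ x + 1
instance (key : List Int) (l : Int) (max_value : Int) : Decidable (D_increment_key key l max_value) := by unfold D_increment_key; infer_instance

def Spec_increment_key (key : List Int) (l : Int) (max_value : Int) (out : Option (List Int)) : Prop := ¬ D_increment_key key l max_value → out = increment_key_alt key l max_value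
instance (key : List Int) (l : Int) (max_value : Int) (out : Option (List Int)) : Decidable (Spec_increment_key key l max_value out) := by unfold Spec_increment_key; infer_instance

def pvDiffWitness_increment_key : List Int × Int × Int := ([1], -1, 2)
def pvDiffWitnessOut_increment_key : (Option (List Int)) × (Option (List Int)) := (some [1], none)

-- ===== CLAIM (what is proved, stated in full; the proofs are below) =====
def Claim_unchanged_increment_key : Prop := ∀ (key : List Int) (l : Int) (max_value : Int), Dom_increment_key key l max_value → Pre_increment_key key l max_value → Spec_increment_key key l max_value (increment_key key l max_value)
def Claim_changed_increment_key : Prop := Dom_increment_key (pvDiffWitness_increment_key.1) (pvDiffWitness_increment_key.2.1) (pvDiffWitness_increment_key.2.2) ∧ Pre_increment_key (pvDiffWitness_increment_key.1) (pvDiffWitness_increment_key.2.1) (pvDiffWitness_increment_key.2.2) ∧ D_increment_key (pvDiffWitness_increment_key.1) (pvDiffWitness_increment_key.2.1) (pvDiffWitness_increment_key.2.2) ∧ increment_key (pvDiffWitness_increment_key.1) (pvDiffWitness_increment_key.2.1) (pvDiffWitness_increment_key.2.2) = pvDiffWitnessOut_increment_key.1 ∧ increment_key_alt (pvDiffWitness_increment_key.1)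 (pvDiffWitness_increment_key.2.1) (pvDiffWitness_increment_key.2.2) = pvDiffWitnessOut_increment_key.2 ∧ pvDiffWitnessOut_increment_key.1 ≠ pvDiffWitnessOut_increment_key.2
def Claim_exact_increment_key : Prop := ∀ (key : List Int) (l : Int) (max_value : Int), Dom_increment_key key l max_value → Pre_increment_key key l max_value → D_increment_key key l max_value → increment_key key l max_value ≠ increment_key_alt key l max_value

-- ===== LEMMAS AND PROOFS =====

-- zero positions [a, b) of key (proof-side normal form for both tail-zeroing loops)
def setZ (key : List Int) (a b : Nat) : List Int :=
  (List.range' a (b - a)).foldl (fun k t => k.set t 0) key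

theorem foldl_set_out (L : List Nat) (key : List Int) (j : Nat) (v : Int)
    (h : ∀ t ∈ L, t ≠ j) :
    L.foldl (fun (k : List Int) t => k.set t 0) (key.set j v)
      = (L.foldl (fun (k : List Int) t => k.set t 0) key).set j v := by
  induction L generalizing key with
  | nil => rfl
  | cons t L ih =>
    simp only [List.foldl_cons]
    rw [List.set_comm _ _ (Ne.symm (h t (by simp)))]
    exact ih _ (fun s hs => h s (by simp [hs]))

theorem setZ_succ (key : List Int) (a b : Nat) (hab : a ≤ b) :
    setZ key a (b + 1) = (setZ key a b).set b 0 := by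
  unfold setZ
  have h1 : b + 1 - a = (b - a) + 1 := by omega
  rw [h1, List.range'_1_concat, List.foldl_append]
  simp only [List.foldl_cons, List.foldl_nil]
  congr 1
  omega

theorem find_set_high (mv : Int) (lo : Nat) (key : List Int) (j : Nat) (v : Int) :
    ∀ i, i ≤ key.length → j < key.length → i ≤ j →
      incB_find (key.set j v) mv lo i = incB_find key mv lo i := by
  intro i
  induction i with
  | zero => intro _ _ _; rfl
  | succ n ih =>
    intro hlen hj hij
    simp only [incB_find]
    by_cases h : n + 1 ≤ lo
    · simp [h]
    · have h1 : n < key.length := by omega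
      rw [getElem!_pos (key.set j v) n (by simpa using h1),
          getElem!_pos key n h1, List.getElem_set_ne (by omega)]
      simp only [h, if_neg, not_false_iff]
      split
      · rfl
      · exact ih (by omega) hj (by omega)

theorem find_none_iff (key : List Int) (mv : Int) (lo : Nat) :
    ∀ i, (incB_find key mv lo i = none ↔ ∀ t, lo ≤ t → t < i → ¬(key[t]! + 1 < mv)) := by
  intro i
  induction i with
  | zero =>
    constructor
    · intro _ t _ ht2; omega
    · intro _; rfl
  | succ n ih =>
    simp only [incB_find]
    by_cases h : n + 1 ≤ lo
    · simp only [h, if_pos]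
      constructor
      · intro _ t ht1 ht2; omega
      · intro _; trivial
    · simp only [h, if_neg, not_false_iff]
      split
      · rename_i hlt
        constructor
        · intro hc; exact absurd hc (by simp)
        · intro hall; exact absurd hlt (hall n (by omega) (by omega))
      · rename_i hge
        rw [ih]
        constructor
        · intro hall t ht1 ht2
          by_cases ht : t = n
          · subst ht; exact hge
          · exact hall t ht1 (by omega)
        · intro hall t ht1 ht2; exact hall t ht1 (by omega)

theorem find_some_bounds (key : List Int) (mv : Int) (lo : Nat) :
    ∀ i p, incB_find key mv lo i = some p → lo ≤ p ∧ p < i := by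
  intro i
  induction i with
  | zero => intro p hp; exact absurd hp (by simp [incB_find])
  | succ n ih =>
    intro p hp
    simp only [incB_find] at hp
    by_cases h : n + 1 ≤ lo
    · simp [h] at hp
    · simp only [h, if_neg, not_false_iff] at hp
      split at hp
      · cases hp; omega
      · have := ih p hp; omega

theorem loopA_char (l mv : Int) (lo : Nat) (hlo : lo = (max l 0).toNat) :
    ∀ i (key : List Int), i ≤ key.length →
      increment_key_loop ((i : Int) - l).toNat key (i : Int) l mv =
        (match incB_find key mv lo i with
         | some p => some (setZ (key.set p (key[p]! + 1)) (p + 1) i)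
         | none =>
            if l < 0 then increment_key_loop ((0 : Int) - l).toNat (setZ key 0 i) 0 l mv
            else none) := by
  intro i
  induction i with
  | zero =>
    intro key _
    have h0 : incB_find key mv lo 0 = none := rfl
    rw [h0]
    by_cases hl : l < 0
    · simp only [hl, if_pos]
      have hz : setZ key 0 0 = key := by unfold setZ; rfl
      rw [hz]
      norm_num
    · simp only [hl, if_neg, not_false_iff]
      have hf : ((0 : Int) - l).toNat = 0 := by omega
      simp only [Nat.cast_zero]
      rw [hf]
      rfl
  | succ n ih =>
    intro key hlen
    by_cases hbase : n + 1 ≤ lo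
    · -- still below the scan window: 0 ≤ l and A's fuel is already exhausted (i ≤ l)
      have h0 : incB_find key mv lo (n + 1) = none := by
        simp only [incB_find]; simp [hbase]
      rw [h0]
      have hl : 0 ≤ l := by
        by_contra hneg
        have hm : max l 0 = 0 := by omega
        rw [hm] at hlo
        omega
      have hli : (n : Int) + 1 ≤ l := by
        have hm : max l 0 = l := by omega
        rw [hm] at hlo
        omega
      rw [if_neg (by omega : ¬ l < 0)]
      have hf : (((n : Nat) + 1 : Int) - l).toNat = 0 := by omega
      rw [show ((n + 1 : Nat) : Int) = ((n : Nat) + 1 : Int) by exact Nat.cast_add_one n, hf]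
      rfl
    · -- inside the scan window: one step of A's loop at index n
      have hn : n < key.length := by omega
      have hguard : l < ((n : Int) + 1) := by
        have hm : (max l 0 : Int) ≤ (lo : Int) := by rw [hlo]; omega
        omega
      have hfuel : (((n : Int) + 1) - l).toNat = (((n : Int)) - l).toNat + 1 := by omega
      rw [show ((n + 1 : Nat) : Int) = ((n : Int) + 1) by exact Nat.cast_add_one n, hfuel]
      simp only [increment_key_loop]
      have hget : PySem.List.pyGet? key ((n : Int) + 1 - 1) = some key[n] := by
        have he : ((n : Int) + 1 - 1) = (n : Int) := by ring
        rw [he]; simp [PySem.List.pyGet?_natCast, List.getElem?_eq_getElem hn]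
      simp only [hguard, if_pos, hget]
      have hset : ∀ v : Int, PySem.List.pySetD key ((n : Int) + 1 - 1) v = key.set n v := by
        intro v
        have he : ((n : Int) + 1 - 1) = (n : Int) := by ring
        rw [he]; simp
      have hfind : incB_find key mv lo (n + 1) =
          (if key[n]! + 1 < mv then some n else incB_find key mv lo n) := by
        simp only [incB_find]
        simp [hbase]
      by_cases hc : mv ≤ key[n] + 1
      · -- carry: zero position n and continue
        simp only [hc, if_pos, hset]
        rw [show ((n : Int) + 1 - 1) = (n : Int) from by ring]
        rw [ih (key.set n 0) (by simp; omega)]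
        have hfix : incB_find (key.set n 0) mv lo n = incB_find key mv lo n :=
          find_set_high mv lo key n 0 n (by omega) hn (le_refl n)
        rw [hfix, hfind]
        have hnotlt : ¬ key[n]! + 1 < mv := by rw [getElem!_pos key n hn]; omega
        rw [if_neg hnotlt]
        cases hf : incB_find key mv lo n with
        | none =>
          simp only
          by_cases hl : l < 0
          · simp only [hl, if_pos]
            congr 1
            rw [show setZ (key.set n 0) 0 n
                  = (setZ key 0 n).set n 0 from by
                unfold setZ
                exact foldl_set_out _ _ _ _
                  (by intro t ht; have := List.mem_range'_1.mp ht; omega)]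
            exact (setZ_succ key 0 n (by omega)).symm
          · simp [hl]
        | some p =>
          obtain ⟨hp1, hp2⟩ := find_some_bounds key mv lo n p hf
          simp only
          congr 1
          have hpe : (key.set n 0)[p]! = key[p]! := by
            rw [getElem!_pos _ p (by simpa using (by omega : p < key.length)),
                getElem!_pos key p (by omega), List.getElem_set_ne (by omega)]
          rw [hpe, List.set_comm _ _ (by omega : n ≠ p)]
          rw [show setZ ((key.set p (key[p]! + 1)).set n 0) (p + 1) n
                = (setZ (key.set p (key[p]! + 1)) (p + 1) n).set n 0 from by
              unfold setZ
              exact foldl_set_out _ _ _ _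
                (by intro t ht; have := List.mem_range'_1.mp ht; omega)]
          exact (setZ_succ _ (p + 1) n (by omega)).symm
      · -- no carry: A returns here, B's scan stops at n
        simp only [hc, if_neg, not_false_iff, hset]
        rw [hfind, if_pos (by rw [getElem!_pos key n hn]; omega)]
        simp only
        congr 1
        rw [getElem!_pos key n hn]
        unfold setZ
        have hz : n + 1 - (n + 1) = 0 := by omega
        rw [hz]
        rfl

theorem foldl_set_getElem? (L : List Nat) (key : List Int) (t : Nat) :
    (L.foldl (fun (k : List Int) j => k.set j 0) key)[t]?
      = if t ∈ L then (if t < key.length then some 0 else none) else key[t]? := by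
  induction L generalizing key with
  | nil => simp
  | cons j L ih =>
    simp only [List.foldl_cons]
    rw [ih]
    by_cases hm : t ∈ L
    · simp [hm, List.length_set]
    · by_cases hj : t = j
      · subst hj; simp [hm, List.getElem?_set]
      · simp [hm, hj, Ne.symm hj]

theorem setZ_zero_len (key : List Int) :
    setZ key 0 key.length = List.replicate key.length 0 := by
  apply List.ext_getElem?
  intro t
  unfold setZ
  rw [foldl_set_getElem?]
  by_cases ht : t < key.length
  · simp [List.mem_range'_1, ht]
  · rw [if_neg (by simp [List.mem_range'_1]; omega)]
    rw [List.getElem?_eq_none (by omega : key.length ≤ t),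
        List.getElem?_eq_none (by simp; omega)]

theorem set_replicate_zero (n k : Nat) :
    (List.replicate n (0 : Int)).set k 0 = List.replicate n 0 := by
  apply List.ext_getElem?
  intro t
  rw [List.getElem?_set]
  split
  · rename_i h; subst h
    split <;> rename_i h2
    · simp [(by simpa using h2 : k < n)]
    · simp at h2
      rw [List.getElem?_eq_none (by simpa using h2)]
  · rfl

theorem pySetD_replicate_zero (n : Nat) (i : Int) :
    PySem.List.pySetD (List.replicate n (0 : Int)) i 0 = List.replicate n 0 := by
  unfold PySem.List.pySetD PySem.List.pySet?
  cases h : PySem.List.pyIdx? (List.replicate n (0 : Int)).length i with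
  | none => rfl
  | some k =>
    simp only [Option.map_some, Option.getD_some]
    exact set_replicate_zero n k

theorem loopA_zeros (l mv : Int) (n : Nat) (_hn : 0 < n) (hl : -(n : Int) ≤ l) (hmv : mv ≤ 1) :
    ∀ (k : Nat) (i : Int), (i - l).toNat = k → l ≤ i → i ≤ 0 →
      increment_key_loop ((i - l).toNat) (List.replicate n 0) i l mv = none := by
  intro k
  induction k using Nat.strong_induction_on with
  | _ k ih =>
    intro i hk hli hi0
    by_cases hg : l < i
    · have hfuel : (i - l).toNat = (i - 1 - l).toNat + 1 := by omega
      rw [hfuel]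
      simp only [increment_key_loop]
      rw [if_pos hg]
      have hrange : PySem.Raise.InRange (List.replicate n (0 : Int)).length (i - 1) := by
        constructor <;> simp <;> omega
      obtain ⟨v, hget⟩ : ∃ v, PySem.List.pyGet? (List.replicate n (0 : Int)) (i - 1) = some v := by
        cases hgg : PySem.List.pyGet? (List.replicate n (0 : Int)) (i - 1) with
        | none => rw [PySem.List.pyGet?_eq_none_iff] at hgg; exact absurd hrange hgg
        | some v => exact ⟨v, rfl⟩
      have hv : v = 0 :=
        List.eq_of_mem_replicate (PySem.List.mem_of_pyGet?_eq_some _ hget)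
      subst hv
      simp only [hget]
      rw [if_pos (by omega)]
      rw [pySetD_replicate_zero]
      exact ih (i - 1 - l).toNat (by omega) (i - 1) rfl (by omega) (by omega)
    · have hfuel : (i - l).toNat = 0 := by omega
      rw [hfuel]
      rfl

-- B's result, expressed through incB_find and setZ, for the top-level rewrite
theorem altB_eq (key : List Int) (l mv : Int) :
    increment_key_alt key l mv =
      (match incB_find key mv ((max l 0).toNat) key.length with
       | none => none
       | some p => some (setZ (key.set p (key[p]! + 1)) (p + 1) key.length)) := by
  unfold increment_key_alt
  cases h : incB_find key mv ((max l 0).toNat) key.length with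
  | none => simp [h]
  | some p =>
    simp only [h]
    congr 1
    unfold incB_zeroFrom setZ
    simp [List.length_set]

theorem full_carry_of_find_none (key : List Int) (mv : Int)
    (h : incB_find key mv 0 key.length = none) : ∀ x ∈ key, mv ≤ x + 1 := by
  intro x hx
  obtain ⟨t, ht, rfl⟩ := List.mem_iff_getElem.mp hx
  have := (find_none_iff key mv 0 key.length).mp h t (by omega) ht
  rw [getElem!_pos key t ht] at this
  omega

theorem find_none_of_full_carry (key : List Int) (mv : Int)
    (h : ∀ x ∈ key, mv ≤ x + 1) : incB_find key mv 0 key.length = none := by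
  rw [find_none_iff]
  intro t _ ht
  rw [getElem!_pos key t ht]
  have := h key[t] (List.getElem_mem ht)
  omega

-- ===== VERDICT (by name: the statement is the Claim_ definition above) =====
theorem increment_key_spec : Claim_unchanged_increment_key := by
  intro key l mv _hdom hpre hnd
  obtain ⟨hpre1, hpre2⟩ := hpre
  rw [altB_eq]
  unfold increment_key
  rw [loopA_char l mv ((max l 0).toNat) rfl key.length key (le_refl _)]
  cases hf : incB_find key mv ((max l 0).toNat) key.length with
  | some p => rfl
  | none =>
    simp only
    by_cases hl : l < 0
    · rw [if_pos hl]
      have hkey : key ≠ [] := by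
        intro hnil
        exact hpre1 ⟨hnil, hl⟩
      have hlo0 : ((max l 0).toNat) = 0 := by omega
      rw [hlo0] at hf
      have hfull : ∀ x ∈ key, mv ≤ x + 1 := full_carry_of_find_none key mv hf
      have hmv : mv ≤ 1 := by
        by_contra hmv2
        exact hnd ⟨hl, hkey, by omega, hfull⟩
      have hlen : l + (key.length : Int) ≥ 0 := by
        by_contra hneg
        exact hpre2 ⟨hkey, by omega, hmv, hfull⟩
      have hn : 0 < key.length := by
        cases key with
        | nil => exact absurd rfl hkey
        | cons a t => simp
      rw [setZ_zero_len]
      exact loopA_zeros l mv key.length hn (by omega) hmv ((0 : Int) - l).toNat 0 rfl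
        (by omega) (by omega)
    · rw [if_neg hl]

theorem increment_key_changed : Claim_changed_increment_key := by
  unfold Claim_changed_increment_key
  decide

theorem increment_key_tight : Claim_exact_increment_key := by
  intro key l mv _hdom _hpre hd
  obtain ⟨hl, hkey, hmv, hfull⟩ := hd
  have hn : 0 < key.length := by
    cases key with
    | nil => exact absurd rfl hkey
    | cons a t => simp
  have hB : increment_key_alt key l mv = none := by
    rw [altB_eq]
    have hlo0 : ((max l 0).toNat) = 0 := by omega
    rw [hlo0, find_none_of_full_carry key mv hfull]
  rw [hB]
  unfold increment_key
  rw [loopA_char l mv ((max l 0).toNat) rfl key.length key (le_refl _)]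
  have hlo0 : ((max l 0).toNat) = 0 := by omega
  rw [hlo0, find_none_of_full_carry key mv hfull]
  simp only [if_pos hl]
  rw [setZ_zero_len]
  have hfuel : ((0 : Int) - l).toNat = ((-1 : Int) - l).toNat + 1 := by omega
  rw [hfuel]
  simp only [increment_key_loop]
  rw [if_pos (by omega : l < (0 : Int))]
  have hrange : PySem.Raise.InRange (List.replicate key.length (0 : Int)).length (0 - 1) := by
    constructor <;> simp <;> omega
  obtain ⟨v, hget⟩ : ∃ v, PySem.List.pyGet? (List.replicate key.length (0 : Int)) (0 - 1) = some v := by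
    cases hgg : PySem.List.pyGet? (List.replicate key.length (0 : Int)) (0 - 1) with
    | none => rw [PySem.List.pyGet?_eq_none_iff] at hgg; exact absurd hrange hgg
    | some v => exact ⟨v, rfl⟩
  have hv : v = 0 :=
    List.eq_of_mem_replicate (PySem.List.mem_of_pyGet?_eq_some _ hget)
  subst hv
  simp only [hget]
  rw [if_neg (by omega)]
  simp
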